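-- pv_equiv track=rewrite | github.com/xia-lao/dbm.py | dbm.py | _bjerwo
-- ===== SOURCE A (Python) =====
-- def _bjerwo(a, t, pathword):
--     """
--     Returns pair of right and left dots for each type of diagonal movement
--     Points need to be checked for existance
--     """
--     # if a + t == self.S.c.Xer1 - 1: return None #no gates for I1 BA
--     p = {'++': "+0 0+", '--': "-0 0-", '+-': "+0 0-", '-+': "-0 0+"}[pathword].split()
--     p.append(pathword)
--     ret = []
--     for v in range(len(p)):
--         ar = [a, t]
--         f = p[v]
--         for u in range(len(f)):
--             if f[u] == '+':
--                 ar[u] += 1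
--             elif f[u] == '-':
--                 ar[u] -= 1
--         ret.append(ar)
--     return ret
-- ===== SOURCE B (Python) =====
-- _DELTAS = {
--     '++': [(1, 0), (0, 1), (1, 1)],
--     '--': [(-1, 0), (0, -1), (-1, -1)],
--     '+-': [(1, 0), (0, -1), (1, -1)],
--     '-+': [(-1, 0), (0, 1), (-1, 1)],
-- }
--
-- def _bjerwo(a, t, pathword):
--     return [[a + dx, t + dy] for dx, dy in _DELTAS[pathword]]
-- ===== Notes on version B (the rewrite author's own statement) =====
-- stated objective: simpler
-- what changed: Replaces the string-offset encoding and the per-character parse loop over ['+0','0+',pathword] with a direct numeric delta table mapping each pathword to its three (dx,dy) pairs, building the result by a single map.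
import Mathlib
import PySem

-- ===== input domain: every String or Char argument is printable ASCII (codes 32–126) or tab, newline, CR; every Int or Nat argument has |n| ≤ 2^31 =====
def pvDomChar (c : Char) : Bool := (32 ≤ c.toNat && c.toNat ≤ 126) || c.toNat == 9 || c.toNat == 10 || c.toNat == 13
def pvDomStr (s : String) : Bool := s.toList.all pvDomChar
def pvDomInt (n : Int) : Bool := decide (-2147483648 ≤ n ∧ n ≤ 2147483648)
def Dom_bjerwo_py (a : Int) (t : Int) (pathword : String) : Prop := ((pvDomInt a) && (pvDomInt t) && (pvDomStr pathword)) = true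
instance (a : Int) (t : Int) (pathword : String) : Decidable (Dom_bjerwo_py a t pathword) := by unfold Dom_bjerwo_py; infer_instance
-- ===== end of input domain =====

-- B changes the data representation (numeric delta table instead of parsed offset strings); same output, same cost.

-- ===== PORT A =====
-- the dict literal of A
def bjerwoDict : PySem.Dict String String :=
  PySem.Dict.ofList [("++", "+0 0+"), ("--", "-0 0-"), ("+-", "+0 0-"), ("-+", "-0 0+")]

-- inner loop body: for u in range(len(f)): if f[u]=='+': ar[u]+=1 elif f[u]=='-': ar[u]-=1
def bjerwoInner (ar : List Int) (cu : Char × Nat) : List Int :=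
  if cu.1 = '+' then ar.modify cu.2 (· + 1)
  else if cu.1 = '-' then ar.modify cu.2 (· - 1)
  else ar

def bjerwo_py (a : Int) (t : Int) (pathword : String) : List (List Int) :=
  match bjerwoDict.get? pathword with
  | none => []          -- Python raises KeyError here; excluded by Pre_
  | some s =>
    let p := PySem.Str.split₀ s ++ [pathword]
    -- for v in range(len(p)) indexing p[v] ≡ iterating over p in order
    p.foldl (fun ret f =>
      let ar := f.toList.zipIdx.foldl bjerwoInner [a, t]
      ret ++ [ar]) []

-- ===== PORT B =====
def bjerwoDeltas : PySem.Dict String (List (Int × Int)) :=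
  PySem.Dict.ofList
    [ ("++", [(1, 0), (0, 1), (1, 1)])
    , ("--", [(-1, 0), (0, -1), (-1, -1)])
    , ("+-", [(1, 0), (0, -1), (1, -1)])
    , ("-+", [(-1, 0), (0, 1), (-1, 1)]) ]

def bjerwo_py_alt (a : Int) (t : Int) (pathword : String) : List (List Int) :=
  match bjerwoDeltas.get? pathword with
  | none => []          -- Python raises KeyError here; excluded by Pre_
  | some ds => ds.map (fun d => [a + d.1, t + d.2])

-- ===== PRECONDITION & SPEC =====
-- A raises KeyError unless pathword is one of the four table keys; exactly those inputs are excluded.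
def Pre_bjerwo_py (a : Int) (t : Int) (pathword : String) : Prop :=
  pathword = "++" ∨ pathword = "--" ∨ pathword = "+-" ∨ pathword = "-+"
instance (a : Int) (t : Int) (pathword : String) : Decidable (Pre_bjerwo_py a t pathword) := by unfold Pre_bjerwo_py; infer_instance

def pvWitness_bjerwo_py : Int × Int × String := (3, -5, "+-")

def Spec_bjerwo_py (a : Int) (t : Int) (pathword : String) (out : List (List Int)) : Prop := out = bjerwo_py_alt a t pathword
instance (a : Int) (t : Int) (pathword : String) (out : List (List Int)) : Decidable (Spec_bjerwo_py a t pathword out) := by unfold Spec_bjerwo_py; infer_instance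

-- ===== CLAIM (what is proved, stated in full; the proofs are below) =====
def Claim_equal_bjerwo_py : Prop := ∀ (a : Int) (t : Int) (pathword : String), Dom_bjerwo_py a t pathword → Pre_bjerwo_py a t pathword → Spec_bjerwo_py a t pathword (bjerwo_py a t pathword)

-- ===== LEMMAS AND PROOFS =====

-- ===== VERDICT (by name: the statement is the Claim_ definition above) =====
theorem bjerwo_py_spec : Claim_equal_bjerwo_py := by
  intro a t pw _ hpre
  unfold Spec_bjerwo_py
  rcases hpre with h | h | h | h <;> subst h
  · show [[a + 1, t], [a, t + 1], [a + 1, t + 1]]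
        = [[a + 1, t + 0], [a + 0, t + 1], [a + 1, t + 1]]
    norm_num
  · show [[a - 1, t], [a, t - 1], [a - 1, t - 1]]
        = [[a + -1, t + 0], [a + 0, t + -1], [a + -1, t + -1]]
    simp; omega
  · show [[a + 1, t], [a, t - 1], [a + 1, t - 1]]
        = [[a + 1, t + 0], [a + 0, t + -1], [a + 1, t + -1]]
    simp; omega
  · show [[a - 1, t], [a, t + 1], [a - 1, t + 1]]
        = [[a + -1, t + 0], [a + 0, t + 1], [a + -1, t + 1]]
    simp; omega
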